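-- pv_equiv track=rewrite | github.com/arthurvenicio/data-sctructures | codesignal/special_order/main.py | special_order
-- ===== SOURCE A (Python) =====
-- def special_order(inputString):
--     res = ''
--     n = len(inputString)
--
--     mid = n // 2 + n % 2
--
--     for i in range(n):
--         if i < mid:
--             res += inputString[n - i - 1]
--         else:
--             res += inputString[i - mid]
--
--     return res
-- ===== SOURCE B (Python) =====
-- def special_order(inputString):
--     half = len(inputString) // 2
--     return inputString[half:][::-1] + inputString[:half]
-- ===== Notes on version B (the rewrite author's own statement) =====
-- stated objective: simpler
-- what changed: Replaces the per-index loop with its i<mid branch by a closed-form decomposition: the result is the suffix from len//2 reversed followed by the prefix, computed with two bulk slices.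
import Mathlib
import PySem

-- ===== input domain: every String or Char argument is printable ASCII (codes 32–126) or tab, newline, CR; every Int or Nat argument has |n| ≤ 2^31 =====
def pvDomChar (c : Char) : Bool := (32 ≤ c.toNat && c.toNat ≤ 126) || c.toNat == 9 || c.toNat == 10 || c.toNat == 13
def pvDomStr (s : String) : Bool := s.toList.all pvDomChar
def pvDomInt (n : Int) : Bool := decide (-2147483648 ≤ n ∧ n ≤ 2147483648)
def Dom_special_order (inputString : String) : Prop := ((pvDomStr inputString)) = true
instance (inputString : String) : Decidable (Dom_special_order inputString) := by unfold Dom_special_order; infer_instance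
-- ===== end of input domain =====

-- B replaces A's per-index loop (if i < mid take a char from the end, else from the front)
-- by two bulk slices: reversed suffix from len//2, then the prefix — simpler, no index arithmetic.

-- ===== PORT A =====
-- literal port of A's loop: res starts empty, for i in range(n) append
-- inputString[n-i-1] if i < mid else inputString[i-mid].  In-range indexing
-- never raises, so pyGetD's default is unreachable.
def special_order (inputString : String) : String :=
  let cs := inputString.toList
  let n : Int := (cs.length : Int)
  let mid : Int := PySem.Int.floordiv n 2 + PySem.Int.mod n 2
  let res := (PySem.List.pyRange 0 n 1).foldl
    (fun res i =>
      if i < mid then res ++ [PySem.List.pyGetD cs (n - i - 1) ' ']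
      else res ++ [PySem.List.pyGetD cs (i - mid) ' ']) []
  String.mk res

-- ===== PORT B =====
def special_order_alt (inputString : String) : String :=
  let cs := inputString.toList
  let half : Int := PySem.Int.floordiv ((cs.length : Int)) 2
  String.mk ((PySem.List.slice cs (some half) none).reverse
             ++ PySem.List.slice cs none (some half))

-- ===== PRECONDITION & SPEC =====
def Spec_special_order (inputString : String) (out : String) : Prop := out = special_order_alt inputString
instance (inputString : String) (out : String) : Decidable (Spec_special_order inputString out) := by unfold Spec_special_order; infer_instance

-- ===== CLAIM (what is proved, stated in full; the proofs are below) =====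
def Claim_equal_special_order : Prop := ∀ (inputString : String), Dom_special_order inputString → Spec_special_order inputString (special_order inputString)

-- ===== LEMMAS AND PROOFS =====

-- the mapped element function of A's loop, with n = length, mid = n - n/2
theorem so_core (cs : List Char) :
    (List.range cs.length).map
      (fun (k : Nat) => if ((k : Int)) < ((cs.length : Int) - ((cs.length / 2 : Nat) : Int))
        then PySem.List.pyGetD cs ((cs.length : Int) - (k : Int) - 1) ' '
        else PySem.List.pyGetD cs ((k : Int) - ((cs.length : Int) - ((cs.length / 2 : Nat) : Int))) ' ') =
    (cs.drop (cs.length / 2)).reverse ++ cs.take (cs.length / 2) := by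
  set n := cs.length with hn
  set h := n / 2 with hh
  have hhle : h ≤ n := Nat.div_le_self n 2
  apply List.ext_getElem
  · simp [hn]
    omega
  · intro i hi1 hi2
    simp only [List.length_map, List.length_range] at hi1
    rw [List.getElem_map, List.getElem_range]
    by_cases hc : i < n - h
    · rw [if_pos (by push_cast; omega)]
      have hidx : (n : Int) - (i : Int) - 1 = ((n - i - 1 : Nat) : Int) := by push_cast; omega
      rw [hidx, PySem.List.pyGetD_natCast, List.getElem_append_left
        (by simp; omega)]
      rw [List.getElem_reverse]
      simp only [List.getElem_drop, List.length_drop]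
      rw [List.getD_eq_getElem cs _ (by omega)]
      congr 1
      omega
    · rw [if_neg (by push_cast; omega)]
      have hin : i < n := hi1
      have hidx : (i : Int) - ((n : Int) - ((h : Nat) : Int)) = ((i - (n - h) : Nat) : Int) := by
        push_cast; omega
      rw [hidx, PySem.List.pyGetD_natCast, List.getElem_append_right
        (by simp; omega)]
      simp only [List.getElem_take, List.length_reverse, List.length_drop]
      rw [List.getD_eq_getElem cs _ (by omega)]

-- ===== VERDICT (by name: the statement is the Claim_ definition above) =====
theorem special_order_spec : Claim_equal_special_order := by
  intro s _
  unfold Spec_special_order special_order special_order_alt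
  set cs := s.toList with hcs
  set n := cs.length with hn
  simp only [PySem.List.pyRange_zero_natCast]
  rw [show PySem.Int.floordiv (n : Int) 2 = ((n / 2 : Nat) : Int) from
        by exact_mod_cast PySem.Int.floordiv_natCast n 2,
      show PySem.Int.mod (n : Int) 2 = ((n % 2 : Nat) : Int) from
        by exact_mod_cast PySem.Int.mod_natCast n 2]
  rw [PySem.List.slice_from_natCast, PySem.List.slice_to_natCast]
  have hmid : ((n / 2 : Nat) : Int) + ((n % 2 : Nat) : Int)
      = (n : Int) - ((n / 2 : Nat) : Int) := by
    have := Nat.div_add_mod n 2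
    push_cast
    omega
  rw [hmid]
  have hfold : ∀ (l : List Int) (acc : List Char),
      l.foldl (fun res i =>
        if i < (n : Int) - ((n / 2 : Nat) : Int) then res ++ [PySem.List.pyGetD cs ((n : Int) - i - 1) ' ']
        else res ++ [PySem.List.pyGetD cs (i - ((n : Int) - ((n / 2 : Nat) : Int))) ' ']) acc
      = l.foldl (fun res i => res ++
          [if i < (n : Int) - ((n / 2 : Nat) : Int) then PySem.List.pyGetD cs ((n : Int) - i - 1) ' '
           else PySem.List.pyGetD cs (i - ((n : Int) - ((n / 2 : Nat) : Int))) ' ']) acc := by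
    intro l
    induction l with
    | nil => intro acc; rfl
    | cons x xs ih => intro acc; simp only [List.foldl_cons]; split <;> exact ih _
  rw [hfold, PySem.List.foldl_append_singleton_eq_map, List.nil_append, List.map_map,
    Function.comp_def]
  have := so_core cs
  rw [← hn] at this
  exact congrArg String.mk this
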